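-- pv_equiv track=rewrite | github.com/miguelrego25/PycharmProjects | Laboratórios de Algoritmia II 2021-2022/Treino1/Hacker/main.py | hacker
-- ===== SOURCE A (Python) =====
-- def hacker(log):
--     dic = {}
--     dicnum = {}
--     #inicializar o dicionario com zeros
--
--     for a,b in log:
--         dic[b] = 0
--
--     for a,b in log:
--         dicnum[b] = 0
--
--     for cartao,email in log:
--         if dic[email] != 0:
--             dic[email] = junta(dic[email], cartao)
--         else:
--             dic[email] = cartao
--
--
--     x=sorted (dic.items(),key = lambda x:len(x[1]), reverse=True)
--
--     #conta caracteres * nos numeros de cartao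
--     for email,cartao in x:
--         for numeros in cartao:
--             if numeros == "*":
--                 dicnum[email] += 1
--             else:
--                 continue
--
--     listafinal = []
--
--     for email,cartao in x:
--         listafinal.append((cartao, email , dicnum[email]))
--
--     x = sorted(listafinal, key=lambda x: x[1])
--     x = sorted (x, key = lambda x: x[2])
--
--     listafinal1=[]
--
--     for a,b,c in x:
--         listafinal1.append((a,b))
--
--     return listafinal1
--
-- def junta (cartao2 ,cartao1 ):
--     listavazia = []
--     indice= -1
--
--     for a in cartao1:
--         indice = indice + 1
--         if a == cartao2[indice]:
--             listavazia.append(a)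
--             continue
--         if a == "*":
--             listavazia.append(cartao2[indice])
--             continue
--         if cartao2[indice] == "*":
--             listavazia.append(a)
--             continue
--         else:
--             listavazia.append(a)
--
--
--     return ''.join(listavazia)
-- ===== SOURCE B (Python) =====
-- def hacker(log):
--     # Group the cards of each email (first-seen order), merge each group by a
--     # positional scan (last non-'*' character at each position wins), then one
--     # sort by the tuple key (wildcard count, email).
--     groups = {}
--     for card, email in log:
--         groups.setdefault(email, []).append(card)
--     merged = [(_merge_group(cards), email) for email, cards in groups.items()]
--     merged.sort(key=lambda t: (sum(ch == '*' for ch in t[0]), t[1]))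
--     return merged
--
--
-- def _merge_group(cards):
--     chars = []
--     for i in range(len(cards[-1])):
--         ch = '*'
--         for c in cards:
--             if c[i] != '*':
--                 ch = c[i]
--         chars.append(ch)
--     return ''.join(chars)
-- ===== Notes on version B (the rewrite author's own statement) =====
-- stated objective: simpler
-- what changed: Replaces A's pairwise junta-merging fold, its three dict-priming passes, the throwaway length-descending sort and the two chained stable sorts by: group cards per email once, merge each group with a single positional scan (last non-'*' character at each position wins), and one sort on the tuple key (wildcard count, email).
import Mathlib
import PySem

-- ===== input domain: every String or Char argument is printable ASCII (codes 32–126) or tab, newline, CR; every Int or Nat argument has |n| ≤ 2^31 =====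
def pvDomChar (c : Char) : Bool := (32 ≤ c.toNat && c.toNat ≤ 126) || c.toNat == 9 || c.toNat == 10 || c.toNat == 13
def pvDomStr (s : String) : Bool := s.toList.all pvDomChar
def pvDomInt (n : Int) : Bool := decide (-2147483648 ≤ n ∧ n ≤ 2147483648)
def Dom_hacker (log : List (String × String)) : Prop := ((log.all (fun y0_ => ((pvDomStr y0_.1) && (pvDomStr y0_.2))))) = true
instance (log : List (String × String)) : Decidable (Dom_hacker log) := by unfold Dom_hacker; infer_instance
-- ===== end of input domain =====

-- B is a different decomposition of the task: one grouping pass collecting each email's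
-- cards, a positional scan (last non-'*' char per position) instead of A's pairwise
-- junta fold, and a single sort on the tuple key (wildcard count, email) instead of
-- A's three sorts and priming passes.  Same asymptotic cost; proved equal under Pre_.

-- ===== PORT A =====
-- one step of junta's loop: indice += 1, then the four branches in Python order
-- (cartao2[indice] is in range on every input admitted by Pre_hacker; the ' ' default is unreachable there)
def juntaStep (c2 : List Char) (st : Int × List Char) (a : Char) : Int × List Char :=
  let indice := st.1 + 1
  let c := PySem.List.pyGetD c2 indice ' '
  if a = c then (indice, st.2 ++ [a])
  else if a = '*' then (indice, st.2 ++ [c])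
  else if c = '*' then (indice, st.2 ++ [a])
  else (indice, st.2 ++ [a])

def junta (cartao2 cartao1 : String) : String :=
  String.ofList (cartao1.toList.foldl (juntaStep cartao2.toList) (-1, [])).2

-- dic's Python values form the union int|str (0 until the first card): ported as Option String,
-- none = 0.  Every email's value is `some` once the third loop ran, so `.getD ""` below mirrors
-- Python reading the string value.
def hacker (log : List (String × String)) : List (String × String) :=
  let dic0 : PySem.Dict String (Option String) :=
    log.foldl (fun d p => d.insert p.2 none) PySem.Dict.empty
  let dicnum0 : PySem.Dict String Int :=
    log.foldl (fun d p => d.insert p.2 0) PySem.Dict.empty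
  let dic :=
    log.foldl (fun d p =>
      d.insert p.2 (match d.getD p.2 none with
        | some prev => some (junta prev p.1)
        | none => some p.1)) dic0
  let x1 := PySem.List.sorted dic.items (fun q => PySem.Str.len (q.2.getD "")) true
  let dicnum := x1.foldl (fun d q =>
      (q.2.getD "").toList.foldl
        (fun d2 numeros => if numeros = '*' then d2.insert q.1 (d2.getD q.1 0 + 1) else d2) d)
    dicnum0
  let listafinal := x1.foldl
    (fun acc q => acc ++ [((q.2.getD ""), q.1, dicnum.getD q.1 0)])
    ([] : List (String × String × Int))
  let x2 := PySem.List.sorted listafinal (fun t => t.2.1) false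
  let x3 := PySem.List.sorted x2 (fun t => t.2.2) false
  x3.foldl (fun acc t => acc ++ [(t.1, t.2.1)]) []

-- ===== PORT B =====
-- inner loop of _merge_group: for c in cards: if c[i] != '*': ch = c[i]
-- (c[i] is in range on every input admitted by Pre_hacker; the ' ' default is unreachable there)
def scanStar (cards : List String) (i : Int) : Char :=
  cards.foldl (fun ch c =>
    if PySem.List.pyGetD c.toList i ' ' ≠ '*' then PySem.List.pyGetD c.toList i ' ' else ch) '*'

def mergeGroup (cards : List String) : String :=
  String.ofList
    ((PySem.List.pyRange 0 (PySem.Str.len (PySem.List.pyGetD cards (-1) "")) 1).foldl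
      (fun chars i => chars ++ [scanStar cards i]) [])

def hacker_alt (log : List (String × String)) : List (String × String) :=
  let groups : PySem.Dict String (List String) :=
    log.foldl (fun g p => g.modify p.2 [] (fun cs => cs ++ [p.1])) PySem.Dict.empty
  let merged := groups.items.map (fun kv => (mergeGroup kv.2, kv.1))
  PySem.List.sorted2 merged
    (fun t => (t.1.toList.map (fun ch => if ch == '*' then (1 : Int) else 0)).sum)
    (fun t => t.2) false

-- ===== PRECONDITION & SPEC =====
-- Pre_ excludes exactly the inputs on which A raises IndexError inside junta: a card longer
-- than the previous card recorded for the same email (per email, the card lengths must be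
-- non-increasing in order of appearance).
def Pre_hacker (log : List (String × String)) : Prop :=
  ∀ e ∈ log.map (fun p => p.2),
    ((log.filter (fun p => p.2 == e)).map (fun p => p.1.toList.length)).Pairwise (· ≥ ·)
instance (log : List (String × String)) : Decidable (Pre_hacker log) := by
  unfold Pre_hacker; infer_instance
def pvWitness_hacker : (List (String × String)) :=
  [("12*4", "a@x"), ("*234", "a@x"), ("77", "b@x")]

def Spec_hacker (log : List (String × String)) (out : List (String × String)) : Prop :=
  out = hacker_alt log
instance (log : List (String × String)) (out : List (String × String)) :
    Decidable (Spec_hacker log out) := by unfold Spec_hacker; infer_instance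

-- ===== CLAIM (what is proved, stated in full; the proofs are below) =====
def Claim_equal_hacker : Prop :=
  ∀ (log : List (String × String)), Dom_hacker log → Pre_hacker log → Spec_hacker log (hacker log)

-- ===== LEMMAS AND PROOFS =====

lemma juntaStep_eq (c2 : List Char) (i : Int) (acc : List Char) (a : Char) :
    juntaStep c2 (i, acc) a
      = (i + 1, acc ++ [if a = '*' then PySem.List.pyGetD c2 (i + 1) ' ' else a]) := by
  unfold juntaStep
  split_ifs <;> simp_all

lemma juntaStep_foldl (c2 : List Char) :
    ∀ (l : List Char) (i0 : Int) (acc : List Char),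
      l.foldl (juntaStep c2) (i0, acc)
        = (i0 + l.length,
           acc ++ (List.range l.length).map (fun j =>
             if l.getD j ' ' = '*' then PySem.List.pyGetD c2 (i0 + 1 + j) ' ' else l.getD j ' ')) := by
  intro l
  induction l with
  | nil => intro i0 acc; simp
  | cons a l ih =>
      intro i0 acc
      rw [List.foldl_cons, juntaStep_eq, ih]
      have h2 : (List.range (a::l).length).map (fun j =>
             if (a::l).getD j ' ' = '*' then PySem.List.pyGetD c2 (i0 + 1 + j) ' ' else (a::l).getD j ' ')
           = (if a = '*' then PySem.List.pyGetD c2 (i0 + 1) ' ' else a)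
             :: (List.range l.length).map (fun j =>
             if l.getD j ' ' = '*' then PySem.List.pyGetD c2 (i0 + 1 + 1 + j) ' ' else l.getD j ' ') := by
        rw [List.length_cons, List.range_succ_eq_map, List.map_cons, List.map_map]
        congr 1
        · simp
        · apply List.map_congr_left
          intro j hj
          have hc : (i0:Int) + 1 + ((j + 1 : Nat) : Int) = i0 + 1 + 1 + (j : Int) := by push_cast; ring
          simp only [Function.comp_apply, Nat.succ_eq_add_one, List.getD_cons_succ, hc]
      rw [h2]
      simp [Prod.ext_iff]
      omega

lemma junta_toList (c2 c1 : String) :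
    (junta c2 c1).toList
      = (List.range c1.toList.length).map (fun j =>
          if c1.toList.getD j ' ' = '*' then c2.toList.getD j ' ' else c1.toList.getD j ' ') := by
  unfold junta
  rw [juntaStep_foldl]
  simp only [String.toList_ofList, List.nil_append]
  apply List.map_congr_left
  intro j hj
  have h : (-1 : Int) + 1 + (j : Int) = (j : Int) := by omega
  rw [h, PySem.List.pyGetD_natCast]

lemma scanStar_append (l : List String) (d : String) (i : Int) :
    scanStar (l ++ [d]) i
      = if PySem.List.pyGetD d.toList i ' ' ≠ '*' then PySem.List.pyGetD d.toList i ' '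
        else scanStar l i := by
  unfold scanStar
  rw [List.foldl_append]
  simp

lemma mergeGroup_toList (cards : List String) (h : cards ≠ []) :
    (mergeGroup cards).toList
      = (List.range (cards.getLast h).toList.length).map (fun j : Nat => scanStar cards (j : Int)) := by
  unfold mergeGroup
  rw [PySem.List.pyGetD_neg_one cards "" h, PySem.Str.len_eq, PySem.List.pyRange_zero_natCast,
    List.foldl_map, PySem.List.foldl_append_singleton_eq_map]
  simp [- List.map_eq_flatMap]

lemma merge_eq (t : List String) (c : String)
    (h : (((c :: t).map (fun s => s.toList.length)).Pairwise (· ≥ ·))) :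
    t.foldl junta c = mergeGroup (c :: t) := by
  induction t using List.reverseRecOn with
  | nil =>
      simp only [List.foldl_nil]
      apply String.toList_inj.mp
      have hne : ([c] : List String) ≠ [] := by simp
      rw [mergeGroup_toList [c] hne]
      have hl : ([c].getLast hne) = c := rfl
      rw [hl]
      apply List.ext_getElem
      · simp
      · intro i h1 h2
        simp only [List.getElem_map, List.getElem_range]
        have hi : i < c.toList.length := by simpa using h1
        unfold scanStar
        simp only [List.foldl_cons, List.foldl_nil, PySem.List.pyGetD_natCast]
        rw [List.getD_eq_getElem c.toList ' ' hi]
        split_ifs with hs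
        · rfl
        · simpa using hs

  | append_singleton t' d ih =>
      have hmapapp : ((c :: (t' ++ [d])).map (fun s => s.toList.length))
          = ((c :: t').map (fun s => s.toList.length)) ++ [d.toList.length] := by
        simp
      have hsub : ((c :: t').map (fun s => s.toList.length)).Sublist
          ((c :: (t' ++ [d])).map (fun s => s.toList.length)) := by
        rw [hmapapp]; exact List.sublist_append_left _ _
      have ih' := ih (List.Pairwise.sublist hsub h)
      rw [List.foldl_append, List.foldl_cons, List.foldl_nil, ih']
      have hne1 : (c :: t') ≠ [] := by simp
      have hne2 : (c :: (t' ++ [d])) ≠ [] := by simp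
      have hdle : d.toList.length ≤ ((c :: t').getLast hne1).toList.length := by
        have hmem : ((c :: t').getLast hne1) ∈ (c :: t') := List.getLast_mem hne1
        have hp := h
        rw [hmapapp] at hp
        rw [List.pairwise_append] at hp
        exact hp.2.2 _ (List.mem_map_of_mem hmem) _ (by simp)
      apply String.toList_inj.mp
      rw [junta_toList, mergeGroup_toList _ hne2]
      have hlast : ((c :: (t' ++ [d])).getLast hne2) = d := by
        simp
      rw [hlast]
      apply List.ext_getElem
      · simp
      · intro i h1 h2
        simp only [List.getElem_map, List.getElem_range]
        have hi : i < d.toList.length := by simpa using h1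
        rw [show (c :: (t' ++ [d])) = (c :: t') ++ [d] by simp, scanStar_append,
          PySem.List.pyGetD_natCast, List.getD_eq_getElem d.toList ' ' hi]
        have hM : (mergeGroup (c :: t')).toList
            = (List.range ((c :: t').getLast hne1).toList.length).map
                (fun j : Nat => scanStar (c :: t') (j : Int)) := mergeGroup_toList _ hne1
        by_cases hs : d.toList[i] = '*'
        · rw [if_pos hs, if_neg (by simpa using hs)]
          rw [hM, PySem.List.getD_map_range _ _ i _ (lt_of_lt_of_le hi hdle)]
        · rw [if_neg hs, if_pos (by simpa using hs)]

def juntaO (o : Option String) (cs : List String) : Option String :=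
  cs.foldl (fun o c => some (match o with | some prev => junta prev c | none => c)) o

def cardsOf (log : List (String × String)) (e : String) : List String :=
  (log.filter (fun p => p.2 == e)).map (fun p => p.1)

lemma getD_fold_const_none (l : List (String × String))
    (d : PySem.Dict String (Option String)) (e : String) (h : d.getD e none = none) :
    (l.foldl (fun d p => d.insert p.2 (none : Option String)) d).getD e none = none := by
  induction l generalizing d with
  | nil => simpa using h
  | cons p l ih =>
      rw [List.foldl_cons]
      exact ih _ (by rw [PySem.Dict.getD_insert]; split <;> simp [h])

lemma getD_fold_const_zero (l : List (String × String))
    (d : PySem.Dict String Int) (e : String) (h : d.getD e 0 = 0) :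
    (l.foldl (fun d p => d.insert p.2 (0 : Int)) d).getD e 0 = 0 := by
  induction l generalizing d with
  | nil => simpa using h
  | cons p l ih =>
      rw [List.foldl_cons]
      exact ih _ (by rw [PySem.Dict.getD_insert]; split <;> simp [h])

lemma cardsOf_cons (p : String × String) (l : List (String × String)) (e : String) :
    cardsOf (p :: l) e = if p.2 = e then p.1 :: cardsOf l e else cardsOf l e := by
  by_cases hpe : p.2 = e <;> simp [cardsOf, hpe]

lemma foldA_getD (l : List (String × String)) (d : PySem.Dict String (Option String))
    (e : String) :
    (l.foldl (fun d p => d.insert p.2 (match d.getD p.2 none with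
        | some prev => some (junta prev p.1)
        | none => some p.1)) d).getD e none
      = juntaO (d.getD e none) (cardsOf l e) := by
  induction l generalizing d with
  | nil => simp [cardsOf, juntaO]
  | cons p l ih =>
      rw [List.foldl_cons, ih, cardsOf_cons]
      by_cases hpe : p.2 = e
      · rw [if_pos hpe, PySem.Dict.getD_insert, if_pos hpe.symm]
        subst hpe
        show juntaO _ _ = juntaO _ (p.1 :: _)
        unfold juntaO
        rw [List.foldl_cons]
        congr 1
        cases d.getD p.2 none <;> rfl
      · rw [if_neg hpe, PySem.Dict.getD_insert, if_neg (fun hh => hpe hh.symm)]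

lemma set_update_of_subset (l : List String) (s : PySem.Set String)
    (h : ∀ x ∈ l, x ∈ s) : PySem.Set.update s l = s := by
  induction l generalizing s with
  | nil => rfl
  | cons x l ih =>
      show PySem.Set.update (PySem.Set.add s x) l = s
      have hx : PySem.Set.add s x = s := by
        unfold PySem.Set.add
        rw [if_pos (by simpa [List.contains_iff_mem] using h x (by simp))]
      rw [hx]
      exact ih s (fun y hy => h y (by simp [hy]))

lemma juntaO_some (cs : List String) (m : String) :
    juntaO (some m) cs = some (cs.foldl junta m) := by
  induction cs generalizing m with
  | nil => rfl
  | cons c cs ih => rw [juntaO, List.foldl_cons]; exact ih _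

lemma juntaO_none_cons (c : String) (cs : List String) :
    juntaO none (c :: cs) = some (cs.foldl junta c) := by
  rw [juntaO, List.foldl_cons]
  exact juntaO_some cs c

lemma innerCount (s : List Char) (d : PySem.Dict String Int) (e e' : String) :
    (s.foldl (fun d2 c => if c = '*' then d2.insert e (d2.getD e 0 + 1) else d2) d).getD e' 0
      = d.getD e' 0 + (if e' = e then (s.count '*' : Int) else 0) := by
  induction s generalizing d with
  | nil => simp
  | cons c s ih =>
      rw [List.foldl_cons, ih]
      by_cases hc : c = '*'
      · rw [if_pos hc, PySem.Dict.getD_insert]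
        by_cases he : e' = e
        · rw [if_pos he, if_pos he, if_pos he]
          subst hc he
          simp
          ring
        · rw [if_neg he, if_neg he, if_neg he]
      · rw [if_neg hc]
        by_cases he : e' = e <;> simp [he, hc]

lemma outerUntouched (l : List (String × Option String)) (d : PySem.Dict String Int)
    (e : String) (h : e ∉ l.map (fun q => q.1)) :
    (l.foldl (fun d q => (q.2.getD "").toList.foldl
        (fun d2 numeros => if numeros = '*' then d2.insert q.1 (d2.getD q.1 0 + 1) else d2) d)
      d).getD e 0 = d.getD e 0 := by
  induction l generalizing d with
  | nil => rfl
  | cons q l ih =>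
      rw [List.foldl_cons]
      have hne : e ∉ l.map (fun q => q.1) := by simp at h; simp [h]
      rw [ih _ hne, innerCount]
      have : ¬ e = q.1 := by simp at h; exact h.1
      simp [this]

lemma outerCount (l : List (String × Option String)) (d : PySem.Dict String Int)
    (hnd : (l.map (fun q => q.1)).Nodup) (q : String × Option String) (hq : q ∈ l) :
    (l.foldl (fun d q => (q.2.getD "").toList.foldl
        (fun d2 numeros => if numeros = '*' then d2.insert q.1 (d2.getD q.1 0 + 1) else d2) d)
      d).getD q.1 0
      = d.getD q.1 0 + ((q.2.getD "").toList.count '*' : Int) := by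
  induction l generalizing d with
  | nil => cases hq
  | cons p l ih =>
      rw [List.foldl_cons]
      rcases List.mem_cons.mp hq with h | h
      · subst h
        have hnin : q.1 ∉ l.map (fun r => r.1) := by
          simp only [List.map_cons, List.nodup_cons] at hnd
          exact hnd.1
        rw [outerUntouched _ _ _ hnin, innerCount, if_pos rfl]
      · have hnd' : (l.map (fun r => r.1)).Nodup := by
          simp only [List.map_cons, List.nodup_cons] at hnd
          exact hnd.2
        rw [ih _ hnd' h, innerCount]
        have hne : ¬ q.1 = p.1 := by
          simp only [List.map_cons, List.nodup_cons] at hnd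
          intro hh
          exact hnd.1 (hh ▸ List.mem_map_of_mem h)
        simp [hne]

lemma groups_getD (log : List (String × String)) (e : String) :
    (log.foldl (fun g p => g.modify p.2 [] (fun cs => cs ++ [p.1])) PySem.Dict.empty).getD e []
      = cardsOf log e := by
  have h := PySem.Dict.getD_foldl_modify_append (log.map (fun p => (p.2, p.1)))
    (PySem.Dict.empty : PySem.Dict String (List String)) e
  rw [List.foldl_map] at h
  simpa [cardsOf, List.filter_map, Function.comp] using h

lemma insertBy_pairwise_lex {α : Type} (k1 : α → Int) (k2 : α → String) (x : α) :
    ∀ (acc : List α),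
      acc.Pairwise (fun a b => k1 a < k1 b ∨ (k1 a = k1 b ∧ k2 a < k2 b)) →
      (∀ y ∈ acc, k1 y = k1 x → k2 y < k2 x) →
      (PySem.List.insertBy (fun a b => decide (k1 a < k1 b)) x acc).Pairwise
        (fun a b => k1 a < k1 b ∨ (k1 a = k1 b ∧ k2 a < k2 b)) := by
  intro acc
  induction acc with
  | nil => intro _ _; simp [PySem.List.insertBy]
  | cons y ys ih =>
      intro hp hk
      rw [PySem.List.insertBy]
      by_cases hb : k1 x < k1 y
      · rw [if_pos (by simpa using hb)]
        refine List.Pairwise.cons ?_ hp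
        intro z hz
        rcases List.mem_cons.mp hz with rfl | hz'
        · exact Or.inl hb
        · rcases List.rel_of_pairwise_cons hp hz' with h | ⟨heq, _⟩
          · exact Or.inl (hb.trans h)
          · exact Or.inl (heq ▸ hb)
      · rw [if_neg (by simpa using hb)]
        refine List.Pairwise.cons ?_ (ih hp.of_cons (fun z hz => hk z (List.mem_cons_of_mem _ hz)))
        intro z hz
        rcases (PySem.List.mem_insertBy _ _ _ _).mp hz with hzx | hz'
        · rw [hzx]
          rw [not_lt] at hb
          rcases lt_or_eq_of_le hb with h | h
          · exact Or.inl h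
          · exact Or.inr ⟨h, hk y (by simp) h⟩
        · exact List.rel_of_pairwise_cons hp hz'

lemma foldl_insertBy_pairwise_lex {α : Type} (k1 : α → Int) (k2 : α → String) :
    ∀ (xs acc : List α),
      acc.Pairwise (fun a b => k1 a < k1 b ∨ (k1 a = k1 b ∧ k2 a < k2 b)) →
      (∀ y ∈ acc, ∀ x ∈ xs, k2 y < k2 x) →
      xs.Pairwise (fun a b => k2 a < k2 b) →
      (xs.foldl (fun acc x => PySem.List.insertBy (fun a b => decide (k1 a < k1 b)) x acc)
        acc).Pairwise (fun a b => k1 a < k1 b ∨ (k1 a = k1 b ∧ k2 a < k2 b)) := by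
  intro xs
  induction xs with
  | nil => intro acc hp _ _; simpa using hp
  | cons x xs ih =>
      intro acc hp hcross hxs
      rw [List.foldl_cons]
      refine ih _ (insertBy_pairwise_lex k1 k2 x acc hp
        (fun y hy heq => hcross y hy x (by simp) )) ?_ hxs.of_cons
      intro y hy x' hx'
      rcases (PySem.List.mem_insertBy _ _ _ _).mp hy with rfl | hy'
      · exact List.rel_of_pairwise_cons hxs hx'
      · exact hcross y hy' x' (List.mem_cons_of_mem _ hx')

lemma sorted_pairwise_lex {α : Type} (xs : List α) (k1 : α → Int) (k2 : α → String)
    (h : xs.Pairwise (fun a b => k2 a < k2 b)) :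
    (PySem.List.sorted xs k1 false).Pairwise
      (fun a b => k1 a < k1 b ∨ (k1 a = k1 b ∧ k2 a < k2 b)) := by
  rw [PySem.List.sorted_eq_foldl_insertBy]
  exact foldl_insertBy_pairwise_lex k1 k2 xs [] (by simp) (by simp) h

lemma sorted2_eq_sorted_lex {α : Type} (xs : List α) (k1 : α → Int) (k2 : α → String) :
    PySem.List.sorted2 xs k1 k2 false
      = PySem.List.sorted xs (fun x => toLex (k1 x, k2 x)) false := by
  rw [PySem.List.sorted_eq_foldl_insertBy]
  have hb : (fun (a b : α) => decide (k1 a < k1 b) || (!decide (k1 b < k1 a) && decide (k2 a < k2 b)))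
      = (fun a b => decide (toLex (k1 a, k2 a) < toLex (k1 b, k2 b))) := by
    funext a b
    by_cases h1 : k1 a < k1 b
    · simp [h1, Prod.Lex.lt_iff]
    · by_cases h2 : k1 b < k1 a
      · simp [h1, h2, Prod.Lex.lt_iff, ne_of_gt h2]
      · have he : k1 a = k1 b := le_antisymm (not_lt.mp h2) (not_lt.mp h1)
        simp [Prod.Lex.lt_iff, he]
  show List.foldl (fun acc x => PySem.List.insertBy
      (fun a b => decide (k1 a < k1 b) || (!decide (k1 b < k1 a) && decide (k2 a < k2 b))) x acc)
      [] xs = _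
  rw [hb]


-- proof-side names for the pipeline stages of the two ports (each equation is rfl)

def emapOf (log : List (String × String)) : List String := log.map (fun p => p.2)

def KOf (log : List (String × String)) : List String := PySem.Set.ofList (emapOf log)

def mrg (log : List (String × String)) (e : String) : String := mergeGroup (cardsOf log e)

def starsInt (s : String) : Int := (s.toList.count '*' : Int)

def dic0A (log : List (String × String)) : PySem.Dict String (Option String) :=
  log.foldl (fun d p => d.insert p.2 (none : Option String)) PySem.Dict.empty

def dicnum0A (log : List (String × String)) : PySem.Dict String Int :=
  log.foldl (fun d p => d.insert p.2 (0 : Int)) PySem.Dict.empty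

def dicA (log : List (String × String)) : PySem.Dict String (Option String) :=
  log.foldl (fun d p =>
    d.insert p.2 (match d.getD p.2 none with
      | some prev => some (junta prev p.1)
      | none => some p.1)) (dic0A log)

def x1A (log : List (String × String)) : List (String × Option String) :=
  PySem.List.sorted (dicA log).items (fun q => PySem.Str.len (q.2.getD "")) true

def dicnumA (log : List (String × String)) : PySem.Dict String Int :=
  (x1A log).foldl (fun d q =>
    (q.2.getD "").toList.foldl
      (fun d2 numeros => if numeros = '*' then d2.insert q.1 (d2.getD q.1 0 + 1) else d2) d)
    (dicnum0A log)

def lfA (log : List (String × String)) : List (String × String × Int) :=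
  (x1A log).foldl
    (fun acc q => acc ++ [((q.2.getD ""), q.1, (dicnumA log).getD q.1 0)])
    ([] : List (String × String × Int))

def x2A (log : List (String × String)) : List (String × String × Int) :=
  PySem.List.sorted (lfA log) (fun t => t.2.1) false

def x3A (log : List (String × String)) : List (String × String × Int) :=
  PySem.List.sorted (x2A log) (fun t => t.2.2) false

lemma hacker_eq (log : List (String × String)) :
    hacker log = (x3A log).foldl (fun acc t => acc ++ [(t.1, t.2.1)]) [] := rfl

def groupsB (log : List (String × String)) : PySem.Dict String (List String) :=
  log.foldl (fun g p => g.modify p.2 [] (fun cs => cs ++ [p.1])) PySem.Dict.empty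

def mergedB (log : List (String × String)) : List (String × String) :=
  (groupsB log).items.map (fun kv => (mergeGroup kv.2, kv.1))

lemma hacker_alt_eq (log : List (String × String)) :
    hacker_alt log = PySem.List.sorted2 (mergedB log)
      (fun t => (t.1.toList.map (fun ch => if ch == '*' then (1 : Int) else 0)).sum)
      (fun t => t.2) false := rfl

lemma k1B_eq (s : String) :
    ((s.toList.map (fun ch => if ch == '*' then (1 : Int) else 0)).sum) = starsInt s := by
  rw [PySem.List.sum_map_ite_one_zero, starsInt, List.count_eq_countP]

lemma keysA (log : List (String × String)) : (dicA log).keys = KOf log := by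
  have h1 := PySem.Dict.keys_foldl_insert_key log (fun p => p.2)
    (fun d p => (match d.getD p.2 none with
      | some prev => some (junta prev p.1)
      | none => some p.1)) (dic0A log)
  have h2 := PySem.Dict.keys_foldl_insert_key log (fun p => p.2)
    (fun _ _ => (none : Option String)) (PySem.Dict.empty : PySem.Dict String (Option String))
  have h0 : (dic0A log).keys = KOf log := by
    unfold dic0A
    rw [h2, PySem.Dict.keys_empty]
    rfl
  unfold dicA
  rw [h1, h0]
  exact set_update_of_subset _ _ (fun x hx => (PySem.Set.mem_ofList _ _).mpr hx)

lemma nodupK (log : List (String × String)) : (KOf log).Nodup :=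
  PySem.Set.nodup_ofList _

lemma dicA_getD (log : List (String × String)) (e : String) :
    (dicA log).getD e none = juntaO none (cardsOf log e) := by
  unfold dicA
  rw [foldA_getD]
  congr 1
  exact getD_fold_const_none log _ e (by simp [pysem])

lemma cards_ne (log : List (String × String)) (e : String) (he : e ∈ emapOf log) :
    cardsOf log e ≠ [] := by
  obtain ⟨p, hp, hpe⟩ := List.mem_map.mp he
  have hf : p ∈ log.filter (fun p => p.2 == e) := List.mem_filter.mpr ⟨hp, by simp [hpe]⟩
  exact List.ne_nil_of_mem (List.mem_map_of_mem hf)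

lemma mergedA (log : List (String × String)) (hpre : Pre_hacker log)
    (e : String) (he : e ∈ emapOf log) :
    (dicA log).getD e none = some (mrg log e) := by
  obtain ⟨c, t, hct⟩ := List.exists_cons_of_ne_nil (cards_ne log e he)
  rw [dicA_getD, hct, juntaO_none_cons]
  have hpair : (((c :: t).map (fun s => s.toList.length)).Pairwise (· ≥ ·)) := by
    have hp := hpre e he
    rw [← hct]
    unfold cardsOf
    rw [List.map_map]
    exact hp
  rw [merge_eq t c hpair, mrg, hct]

lemma itemsA (log : List (String × String)) (hpre : Pre_hacker log) :
    (dicA log).items = (KOf log).map (fun e => (e, some (mrg log e))) := by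
  have hnd : (dicA log).keys.Nodup := by rw [keysA]; exact nodupK log
  rw [PySem.Dict.items_eq_map_keys (dicA log) hnd none, keysA]
  apply List.map_congr_left
  intro e he
  have he' : e ∈ emapOf log := (PySem.Set.mem_ofList _ _).mp he
  rw [mergedA log hpre e he']

lemma keysB (log : List (String × String)) : (groupsB log).keys = KOf log := by
  unfold groupsB
  rw [PySem.Dict.keys_foldl_modify_key log (fun p => p.2) []
    (fun _ p cs => cs ++ [p.1]) PySem.Dict.empty, PySem.Dict.keys_empty]
  rfl

lemma itemsB (log : List (String × String)) :
    (groupsB log).items = (KOf log).map (fun e => (e, cardsOf log e)) := by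
  have hnd : (groupsB log).keys.Nodup := by rw [keysB]; exact nodupK log
  rw [PySem.Dict.items_eq_map_keys (groupsB log) hnd [], keysB]
  apply List.map_congr_left
  intro e he
  rw [show (groupsB log).getD e [] = cardsOf log e from groups_getD log e]

lemma mergedB_eq (log : List (String × String)) :
    mergedB log = (KOf log).map (fun e => (mrg log e, e)) := by
  rw [mergedB, itemsB, List.map_map]
  rfl

lemma lfA_eq (log : List (String × String)) :
    lfA log = (x1A log).map (fun q => ((q.2.getD ""), q.1, (dicnumA log).getD q.1 0)) := by
  unfold lfA
  rw [PySem.List.foldl_append_singleton_eq_map]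
  simp

-- ===== VERDICT (by name: the statement is the Claim_ definition above) =====
set_option maxHeartbeats 1000000 in
theorem hacker_spec : Claim_equal_hacker := by
  intro log _hdom hpre
  unfold Spec_hacker
  rw [hacker_eq, hacker_alt_eq, sorted2_eq_sorted_lex, PySem.List.foldl_append_singleton_eq_map,
    List.nil_append]
  -- membership description of x1A
  have hx1perm : (x1A log).Perm (dicA log).items := PySem.List.sorted_perm _ _ _
  have hx1mem : ∀ q ∈ x1A log, ∃ e ∈ KOf log, q = (e, some (mrg log e)) := by
    intro q hq
    have : q ∈ (dicA log).items := hx1perm.mem_iff.mp hq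
    rw [itemsA log hpre] at this
    obtain ⟨e, he, hqe⟩ := List.mem_map.mp this
    exact ⟨e, he, hqe.symm⟩
  -- emails of x1A are nodup
  have hkeysperm : ((x1A log).map (fun q => q.1)).Perm (KOf log) := by
    have h := hx1perm.map (fun q => q.1)
    have : (dicA log).items.map (fun q => q.1) = (dicA log).keys := rfl
    rw [this, keysA] at h
    exact h
  have hx1nd : ((x1A log).map (fun q => q.1)).Nodup :=
    (hkeysperm.symm.nodup (nodupK log))
  -- dicnum values
  have hdicnum : ∀ q ∈ x1A log, (dicnumA log).getD q.1 0 = ((q.2.getD "").toList.count '*' : Int) := by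
    intro q hq
    unfold dicnumA
    rw [outerCount (x1A log) (dicnum0A log) hx1nd q hq]
    have h0 : (dicnum0A log).getD q.1 0 = 0 := by
      unfold dicnum0A
      exact getD_fold_const_zero log _ _ (by simp [pysem])
    rw [h0, zero_add]
  -- lfA as a map over emails
  have hlf : lfA log = ((x1A log).map (fun q => q.1)).map
      (fun e => (mrg log e, e, starsInt (mrg log e))) := by
    rw [lfA_eq, List.map_map]
    apply List.map_congr_left
    intro q hq
    obtain ⟨e, he, rfl⟩ := hx1mem q hq
    have hd : (dicnumA log).getD e 0 = starsInt (mrg log e) :=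
      hdicnum (e, some (mrg log e)) hq
    show ((some (mrg log e)).getD "", e, (dicnumA log).getD e 0)
        = (mrg log e, e, starsInt (mrg log e))
    rw [Option.getD_some, hd]
  -- the permutation chain
  have hx2perm : (x2A log).Perm (lfA log) := PySem.List.sorted_perm _ _ _
  have hx3perm : (x3A log).Perm (x2A log) := PySem.List.sorted_perm _ _ _
  have hlfmem : ∀ t ∈ lfA log, t.2.2 = starsInt t.1 := by
    intro t ht
    rw [hlf] at ht
    obtain ⟨e, _, rfl⟩ := List.mem_map.mp ht
    rfl
  have hx3mem : ∀ t ∈ x3A log, t.2.2 = starsInt t.1 := by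
    intro t ht
    exact hlfmem t (hx2perm.mem_iff.mp (hx3perm.mem_iff.mp ht))
  -- strictly increasing emails in x2A
  have hx2emnd : ((x2A log).map (fun t => t.2.1)).Nodup := by
    have hlfem : (lfA log).map (fun t => t.2.1) = (x1A log).map (fun q => q.1) := by
      rw [hlf, List.map_map]
      simp
    have hperm2 : ((x1A log).map (fun q => q.1)).Perm ((x2A log).map (fun t => t.2.1)) := by
      rw [← hlfem]
      exact (hx2perm.map _).symm
    exact hperm2.nodup hx1nd
  have hx2strict : (x2A log).Pairwise (fun a b => a.2.1 < b.2.1) := by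
    have hle : (x2A log).Pairwise (fun a b => a.2.1 ≤ b.2.1) :=
      PySem.List.sorted_pairwise _ _
    have hne : (x2A log).Pairwise (fun a b => a.2.1 ≠ b.2.1) :=
      List.pairwise_map.mp hx2emnd
    exact (hle.and hne).imp (fun h => lt_of_le_of_ne h.1 h.2)
  -- x3A is strictly sorted under the lexicographic (count, email) key
  have hx3pair : (x3A log).Pairwise
      (fun a b => a.2.2 < b.2.2 ∨ (a.2.2 = b.2.2 ∧ a.2.1 < b.2.1)) :=
    sorted_pairwise_lex (x2A log) (fun t => t.2.2) (fun t => t.2.1) hx2strict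
  -- conclude by uniqueness of the strictly sorted permutation
  symm
  apply PySem.List.sorted_eq_of_perm_of_pairwise_lt
  · -- permutation
    have h1 : ((x3A log).map (fun t => (t.1, t.2.1))).Perm
        ((lfA log).map (fun t => (t.1, t.2.1))) := (hx3perm.trans hx2perm).map _
    have h2 : (lfA log).map (fun t => (t.1, t.2.1))
        = ((x1A log).map (fun q => q.1)).map (fun e => (mrg log e, e)) := by
      rw [hlf, List.map_map]
      rfl
    refine h1.trans ?_
    rw [h2, mergedB_eq]
    exact hkeysperm.map _
  · -- strict pairwise
    rw [List.pairwise_map]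
    refine hx3pair.imp_of_mem ?_
    intro a b ha hb hr
    have hca := hx3mem a ha
    have hcb := hx3mem b hb
    have hgoal : starsInt a.1 < starsInt b.1 ∨ (starsInt a.1 = starsInt b.1 ∧ a.2.1 < b.2.1) := by
      rw [← hca, ← hcb]
      exact hr
    rw [Prod.Lex.lt_iff]
    simpa only [k1B_eq, ofLex_toLex] using hgoal
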